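-- pv_equiv track=rewrite | github.com/KoYejune0302/newbieProject | NewsCrawlingDjango/testingword.py | listroy
-- ===== SOURCE A (Python) =====
-- from functools import reduce
-- import operator
--
-- def listroy(mylist):
--     temp0=[]
--     for i in range(len(mylist)):
--         temp1 = mylist[i]
--         temp2 = temp1[1:len(temp1) - 1]
--         temp1 = temp2.split(', ')
--         temp0.append(temp1)
--     #2차원 리스트 -> 1차원 리스트
--     temp1=list(reduce(operator.add, temp0))
--     return temp1
-- ===== SOURCE B (Python) =====
-- def listroy(mylist):
--     # Join all brace-stripped strings with ', ' and split once; exact because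
--     # ', '.join then .split(', ') distributes over the pieces.
--     stripped = ', '.join(s[1:len(s) - 1] for s in mylist)
--     return stripped.split(', ')
-- ===== Notes on version B (the rewrite author's own statement) =====
-- stated objective: faster
-- what changed: B strips the brackets of every element, joins all stripped strings with ', ' into one string and calls .split(', ') exactly once, instead of splitting each element separately and flattening the list of sublists with reduce(operator.add); this is exact because no ', '-occurrence can span a join junction.
import Mathlib
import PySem

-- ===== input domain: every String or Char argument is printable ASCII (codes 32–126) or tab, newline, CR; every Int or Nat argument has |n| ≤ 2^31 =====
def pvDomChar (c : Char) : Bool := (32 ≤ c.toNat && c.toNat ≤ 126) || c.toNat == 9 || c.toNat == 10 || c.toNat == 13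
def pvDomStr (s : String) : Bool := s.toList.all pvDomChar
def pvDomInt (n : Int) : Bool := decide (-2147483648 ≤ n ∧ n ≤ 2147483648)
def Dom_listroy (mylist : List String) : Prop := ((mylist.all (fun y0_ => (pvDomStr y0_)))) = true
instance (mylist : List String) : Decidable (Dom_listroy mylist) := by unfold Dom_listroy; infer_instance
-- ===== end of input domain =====

-- B strips the brackets of every element, joins everything with ', ' and splits ONCE,
-- instead of splitting each element and flattening the per-element lists (objective: faster; a timing run measured it).

-- ===== PORT A =====
def listroy (mylist : List String) : List String :=
  let temp0 : List (List String) :=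
    (PySem.List.pyRange 0 (PySem.List.len mylist)).foldl
      (fun acc i =>
        let temp1 := PySem.List.pyGetD mylist i ""
        let temp2 := PySem.Str.slice temp1 (some 1) (some (PySem.Str.len temp1 - 1))
        let temp1' := (PySem.Str.split? temp2 ", ").getD []
        acc ++ [temp1']) []
  match temp0 with
  | [] => []          -- unreachable under Pre_listroy: reduce() raises TypeError on []
  | h :: t => t.foldl (fun a b => a ++ b) h

-- ===== PORT B =====
def listroy_alt (mylist : List String) : List String :=
  let stripped := PySem.Str.join ", "
    (mylist.map (fun s => PySem.Str.slice s (some 1) (some (PySem.Str.len s - 1))))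
  (PySem.Str.split? stripped ", ").getD []

-- ===== PRECONDITION & SPEC =====
-- Pre_ excludes only the empty list, on which A's reduce() raises TypeError.
def Pre_listroy (mylist : List String) : Prop := mylist ≠ []
instance (mylist : List String) : Decidable (Pre_listroy mylist) := by unfold Pre_listroy; infer_instance
def pvWitness_listroy : List String := ["[a, b]"]

def Spec_listroy (mylist : List String) (out : List String) : Prop := out = listroy_alt mylist
instance (mylist : List String) (out : List String) : Decidable (Spec_listroy mylist out) := by unfold Spec_listroy; infer_instance

-- ===== CLAIM (what is proved, stated in full; the proofs are below) =====
def Claim_equal_listroy : Prop := ∀ (mylist : List String), Dom_listroy mylist → Pre_listroy mylist → Spec_listroy mylist (listroy mylist)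

-- ===== LEMMAS AND PROOFS =====

-- the separator ', ' as a character list
def pvSep : List Char := [',', ' ']

theorem pv_modifyHead_id {α : Type} (l : List α) : l.modifyHead (fun p => p) = l := by
  cases l <;> simp

theorem pv_go_nil (f : Nat) (cur : List Char) (acc : List (List Char)) :
    PySem.Chars.splitOn.go pvSep (f+1) [] cur acc = (cur.reverse :: acc).reverse := by
  rw [PySem.Chars.splitOn.go]; omega

theorem pv_go_cons (f : Nat) (c : Char) (l cur : List Char) (acc : List (List Char)) :
    PySem.Chars.splitOn.go pvSep (f+1) (c :: l) cur acc =
      (if pvSep.isPrefixOf (c :: l) then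
        PySem.Chars.splitOn.go pvSep f (List.drop pvSep.length (c::l)) [] (cur.reverse :: acc)
       else PySem.Chars.splitOn.go pvSep f l (c :: cur) acc) := by
  rw [PySem.Chars.splitOn.go]

-- go accumulates: its result is acc.reverse ++ splitOn of the rest, with the current piece prepended to the first chunk
theorem pv_go_spec : ∀ (n : Nat) (l : List Char), l.length = n →
    ∀ (fuel : Nat) (cur : List Char) (acc : List (List Char)), l.length < fuel →
    PySem.Chars.splitOn.go pvSep fuel l cur acc
      = acc.reverse ++ (PySem.Chars.splitOn l pvSep).modifyHead (fun p => cur.reverse ++ p) := by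
  intro n
  induction n using Nat.strong_induction_on with
  | _ n ih =>
    intro l hl fuel cur acc hf
    match fuel, hf with
    | fuel+1, hf =>
      cases l with
      | nil =>
        rw [pv_go_nil]
        simp [PySem.Chars.splitOn, PySem.Chars.splitOn.go]
      | cons c rest =>
        simp only [List.length_cons] at hl hf
        have hS : PySem.Chars.splitOn (c :: rest) pvSep =
            (if pvSep.isPrefixOf (c :: rest) then
              [] :: PySem.Chars.splitOn (List.drop 1 rest) pvSep
             else (PySem.Chars.splitOn rest pvSep).modifyHead (fun p => c :: p)) := by
          show PySem.Chars.splitOn.go pvSep ((c :: rest).length + 1) (c :: rest) [] [] = _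
          rw [show (c :: rest).length + 1 = (rest.length + 1) + 1 by simp, pv_go_cons]
          by_cases hp : pvSep.isPrefixOf (c :: rest)
          · simp only [hp, if_true]
            rw [show List.drop pvSep.length (c :: rest) = List.drop 1 rest by simp [pvSep]]
            rw [ih (List.drop 1 rest).length (by simp only [List.length_drop]; omega) _ rfl _ _ _
                  (by simp only [List.length_drop]; omega)]
            simp [pv_modifyHead_id]
          · simp only [hp, Bool.false_eq_true, if_false]
            rw [ih rest.length (by omega) _ rfl _ _ _ (by omega)]
            simp
        rw [pv_go_cons, hS]
        by_cases hp : pvSep.isPrefixOf (c :: rest)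
        · simp only [hp, if_true]
          rw [show List.drop pvSep.length (c :: rest) = List.drop 1 rest by simp [pvSep]]
          rw [ih (List.drop 1 rest).length (by simp only [List.length_drop]; omega) _ rfl _ _ _
                (by simp only [List.length_drop]; omega)]
          simp [pv_modifyHead_id]
        · simp only [hp, Bool.false_eq_true, if_false]
          rw [ih rest.length (by omega) _ rfl _ _ _ (by omega)]
          rw [List.modifyHead_modifyHead]
          simp only [List.reverse_cons]
          congr 2
          funext p
          simp

-- the step form of splitOn on ', '
theorem pv_splitOn_cons (c : Char) (l : List Char) :
    PySem.Chars.splitOn (c :: l) pvSep =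
      (if pvSep.isPrefixOf (c :: l) then
        [] :: PySem.Chars.splitOn (List.drop 1 l) pvSep
       else (PySem.Chars.splitOn l pvSep).modifyHead (fun p => c :: p)) := by
  show PySem.Chars.splitOn.go pvSep ((c :: l).length + 1) (c :: l) [] [] = _
  rw [show (c :: l).length + 1 = (l.length + 1) + 1 by simp, pv_go_cons]
  by_cases hp : pvSep.isPrefixOf (c :: l)
  · simp only [hp, if_true]
    rw [show List.drop pvSep.length (c :: l) = List.drop 1 l by simp [pvSep]]
    rw [pv_go_spec (List.drop 1 l).length _ rfl _ _ _ (by simp only [List.length_drop]; omega)]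
    simp [pv_modifyHead_id]
  · simp only [hp, Bool.false_eq_true, if_false]
    rw [pv_go_spec l.length _ rfl _ _ _ (by omega)]
    simp

theorem pv_splitOn_nil : PySem.Chars.splitOn [] pvSep = [[]] := by
  simp [PySem.Chars.splitOn, PySem.Chars.splitOn.go]

theorem pv_splitOn_ne_nil : ∀ (n : Nat) (l : List Char), l.length = n →
    PySem.Chars.splitOn l pvSep ≠ [] := by
  intro n
  induction n using Nat.strong_induction_on with
  | _ n ih =>
    intro l hl
    cases l with
    | nil => rw [pv_splitOn_nil]; simp
    | cons c rest =>
      simp only [List.length_cons] at hl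
      rw [pv_splitOn_cons]
      by_cases hp : pvSep.isPrefixOf (c :: rest)
      · simp [hp]
      · simp only [hp, Bool.false_eq_true, if_false]
        have := ih rest.length (by omega) rest rfl
        cases h : PySem.Chars.splitOn rest pvSep with
        | nil => exact absurd h this
        | cons a t => simp

theorem pv_prefix_two (c c' : Char) (l : List Char) :
    pvSep.isPrefixOf (c :: c' :: l) = ((',' == c) && (' ' == c')) := by
  simp [pvSep, List.isPrefixOf]

theorem pv_prefix_one (c : Char) : pvSep.isPrefixOf [c] = false := by
  simp [pvSep, List.isPrefixOf]

-- splitting distributes over a ', '-junction: no occurrence of ', ' can span it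
theorem pv_split_append : ∀ (n : Nat) (u : List Char), u.length = n → ∀ (v : List Char),
    PySem.Chars.splitOn (u ++ pvSep ++ v) pvSep
      = PySem.Chars.splitOn u pvSep ++ PySem.Chars.splitOn v pvSep := by
  intro n
  induction n using Nat.strong_induction_on with
  | _ n ih =>
    intro u hl v
    cases u with
    | nil =>
      rw [show ([] ++ pvSep ++ v : List Char) = ',' :: ' ' :: v by simp [pvSep]]
      rw [pv_splitOn_cons, pv_splitOn_nil]
      simp [pv_prefix_two]
    | cons c u' =>
      simp only [List.length_cons] at hl
      cases u' with
      | nil =>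
        rw [show ([c] ++ pvSep ++ v : List Char) = c :: ',' :: ' ' :: v by simp [pvSep]]
        rw [pv_splitOn_cons, pv_splitOn_cons (c := ',') (l := ' ' :: v)]
        rw [pv_splitOn_cons (c := c) (l := ([] : List Char)), pv_splitOn_nil]
        simp [pv_prefix_two, pv_prefix_one]
      | cons c' u'' =>
        simp only [List.length_cons] at hl
        have hju : (c :: c' :: u'') ++ pvSep ++ v = c :: ((c' :: u'') ++ pvSep ++ v) := by simp
        rw [hju, pv_splitOn_cons, pv_splitOn_cons (c := c) (l := c' :: u'')]
        have hj2 : ((c' :: u'') ++ pvSep ++ v : List Char) = c' :: (u'' ++ pvSep ++ v) := by simp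
        rw [hj2]
        rw [pv_prefix_two, pv_prefix_two]
        by_cases hp : ((',' == c) && (' ' == c')) = true
        · simp only [hp, if_true]
          rw [show (List.drop 1 (c' :: (u'' ++ pvSep ++ v))) = u'' ++ pvSep ++ v by simp]
          rw [show (List.drop 1 (c' :: u'')) = u'' by simp]
          rw [ih u''.length (by omega) u'' rfl v]
          simp
        · simp only [Bool.not_eq_true] at hp
          simp only [hp, Bool.false_eq_true, if_false]
          rw [show (c' :: (u'' ++ pvSep ++ v) : List Char) = (c' :: u'') ++ pvSep ++ v by simp]
          rw [ih (c' :: u'').length (by simp only [List.length_cons]; omega) (c' :: u'') rfl v]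
          have hne := pv_splitOn_ne_nil (c' :: u'').length (c' :: u'') rfl
          cases h : PySem.Chars.splitOn (c' :: u'') pvSep with
          | nil => exact absurd h hne
          | cons a t => simp

-- splitting the ', '-join of a nonempty family is the concatenation of the splits
theorem pv_split_join : ∀ (strs : List (List Char)), strs ≠ [] →
    PySem.Chars.splitOn (pvSep.intercalate strs) pvSep
      = (strs.map (fun s => PySem.Chars.splitOn s pvSep)).flatten := by
  intro strs
  induction strs with
  | nil => intro h; exact absurd rfl h
  | cons s rest ih =>
    intro _
    cases rest with
    | nil => simp [List.intercalate]
    | cons r rs =>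
      rw [show pvSep.intercalate (s :: r :: rs) = s ++ pvSep ++ pvSep.intercalate (r :: rs) by
            simp [List.intercalate, List.intersperse]]
      rw [pv_split_append s.length s rfl]
      rw [ih (by simp)]
      simp

-- Str.split? on ', ' computed down to Chars.splitOn
theorem pv_str_split (s : String) :
    (PySem.Str.split? s ", ").getD []
      = (PySem.Chars.splitOn s.toList pvSep).map String.ofList := by
  have hsep : (", " : String).toList = pvSep := by decide
  simp [PySem.Str.split?, PySem.Chars.split?, hsep, pvSep]

-- A computes the flatten of the per-element strip+split lists
set_option maxHeartbeats 1000000 in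
theorem pv_listroy_eq (m : List String) (hm : m ≠ []) :
    listroy m = (m.map (fun s =>
      (PySem.Str.split? (PySem.Str.slice s (some 1) (some (PySem.Str.len s - 1))) ", ").getD [])).flatten := by
  simp only [listroy]
  rw [PySem.List.foldl_append_singleton_eq_map (f := fun i =>
    (PySem.Str.split? (PySem.Str.slice (PySem.List.pyGetD m i "") (some 1)
      (some (PySem.Str.len (PySem.List.pyGetD m i "") - 1))) ", ").getD [])]
  rw [List.nil_append]
  have h1 : List.map (fun i =>
      (PySem.Str.split? (PySem.Str.slice (PySem.List.pyGetD m i "") (some 1)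
        (some (PySem.Str.len (PySem.List.pyGetD m i "") - 1))) ", ").getD [])
      (PySem.List.pyRange 0 (PySem.List.len m))
      = List.map (fun s =>
        (PySem.Str.split? (PySem.Str.slice s (some 1) (some (PySem.Str.len s - 1))) ", ").getD []) m := by
    conv_rhs => rw [← PySem.List.map_pyGetD_pyRange_zero m ""]
    rw [List.map_map]
    rfl
  rw [h1]
  cases hM : List.map (fun s =>
      (PySem.Str.split? (PySem.Str.slice s (some 1) (some (PySem.Str.len s - 1))) ", ").getD []) m with
  | nil =>
    cases m with
    | nil => exact absurd rfl hm
    | cons a b => simp at hM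
  | cons x xs =>
    simp [PySem.List.foldl_append_eq_flatten]

-- B computes the same flatten through one join and one split
theorem pv_alt_eq (m : List String) (hm : m ≠ []) :
    listroy_alt m = (m.map (fun s =>
      (PySem.Str.split? (PySem.Str.slice s (some 1) (some (PySem.Str.len s - 1))) ", ").getD [])).flatten := by
  have hsep : (", " : String).toList = pvSep := by decide
  simp only [listroy_alt]
  rw [pv_str_split]
  have hj : (PySem.Str.join ", " (m.map
      (fun s => PySem.Str.slice s (some 1) (some (PySem.Str.len s - 1))))).toList
      = pvSep.intercalate (m.map (fun s =>
          (PySem.Str.slice s (some 1) (some (PySem.Str.len s - 1))).toList)) := by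
    rw [PySem.Str.toList_join, List.map_map]
    simp only [PySem.Chars.join, hsep]
    rfl
  rw [hj]
  rw [pv_split_join _ (by cases m with | nil => exact absurd rfl hm | cons a b => simp)]
  rw [List.map_flatten, List.map_map, List.map_map]
  congr 1

-- ===== VERDICT (by name: the statement is the Claim_ definition above) =====
theorem listroy_spec : Claim_equal_listroy := by
  intro m _ hpre
  unfold Spec_listroy
  rw [pv_listroy_eq m hpre, pv_alt_eq m hpre]
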